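-- pv_equiv track=rewrite | github.com/antonypolitakis/signal-bot | services/user_preferences.py | _categorize_preference
-- ===== SOURCE A (Python) =====
-- def _categorize_preference(key: str) -> str:
--     """Categorize preference for UI grouping."""
--     categories = {
--         'Display': ['timezone', 'date_format', 'time_format', 'language'],
--         'Messages': ['messages_per_page', 'show_message_previews', 'compact_message_view',
--                     'show_deleted_messages', 'filter_persist_navigation'],
--         'Notifications': ['show_reaction_notifications', 'notification_sound',
--                          'auto_refresh_interval', 'dashboard_refresh_rate'],
--         'AI & Automation': ['enable_ai_features', 'default_ai_provider',
--                            'enable_auto_reactions', 'default_emoji_mode'],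
--         'Advanced': ['show_unmonitored_groups', 'activity_chart_style'],
--     }
--
--     for category, keys in categories.items():
--         if key in keys:
--             return category
--     return 'Other'
-- ===== SOURCE B (Python) =====
-- # The 19 (preference_key, category) pairs, sorted by key, so the category can be
-- # found by binary search instead of scanning the category lists.
-- _PAIRS = [
--     ('activity_chart_style', 'Advanced'),
--     ('auto_refresh_interval', 'Notifications'),
--     ('compact_message_view', 'Messages'),
--     ('dashboard_refresh_rate', 'Notifications'),
--     ('date_format', 'Display'),
--     ('default_ai_provider', 'AI & Automation'),
--     ('default_emoji_mode', 'AI & Automation'),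
--     ('enable_ai_features', 'AI & Automation'),
--     ('enable_auto_reactions', 'AI & Automation'),
--     ('filter_persist_navigation', 'Messages'),
--     ('language', 'Display'),
--     ('messages_per_page', 'Messages'),
--     ('notification_sound', 'Notifications'),
--     ('show_deleted_messages', 'Messages'),
--     ('show_message_previews', 'Messages'),
--     ('show_reaction_notifications', 'Notifications'),
--     ('show_unmonitored_groups', 'Advanced'),
--     ('time_format', 'Display'),
--     ('timezone', 'Display'),
-- ]
--
--
-- def _categorize_preference(key: str) -> str:
--     """Categorize preference for UI grouping (binary search in the sorted table)."""
--     lo, hi = 0, len(_PAIRS)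
--     while lo < hi:
--         mid = (lo + hi) // 2
--         k, category = _PAIRS[mid]
--         if key < k:
--             hi = mid
--         elif k < key:
--             lo = mid + 1
--         else:
--             return category
--     return 'Other'
-- ===== Notes on version B (the rewrite author's own statement) =====
-- stated objective: alternative
-- what changed: Replaces the per-category loop with membership tests by binary search (hand-written bisection loop) over a single table of (key, category) pairs sorted by key, with the same 'Other' default.
import Mathlib
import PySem

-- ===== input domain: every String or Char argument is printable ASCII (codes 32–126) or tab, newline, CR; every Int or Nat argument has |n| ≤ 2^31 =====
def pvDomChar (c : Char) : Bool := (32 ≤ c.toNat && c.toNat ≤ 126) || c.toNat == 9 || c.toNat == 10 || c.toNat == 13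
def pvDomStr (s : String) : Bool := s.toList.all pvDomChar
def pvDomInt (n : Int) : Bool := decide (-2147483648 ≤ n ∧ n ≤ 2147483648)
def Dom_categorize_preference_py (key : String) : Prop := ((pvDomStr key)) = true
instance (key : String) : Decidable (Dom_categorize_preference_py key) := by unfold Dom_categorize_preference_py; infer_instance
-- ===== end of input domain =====

-- B replaces A's per-category loop with membership tests by binary search over one (key, category) table sorted by key (alternative algorithm, same results).


-- ===== PORT A =====
-- A's categories table, verbatim (dict of category → list of keys, insertion order)
def pvCategories : List (String × List String) :=
  [ ("Display", ["timezone", "date_format", "time_format", "language"]),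
    ("Messages", ["messages_per_page", "show_message_previews", "compact_message_view",
                  "show_deleted_messages", "filter_persist_navigation"]),
    ("Notifications", ["show_reaction_notifications", "notification_sound",
                       "auto_refresh_interval", "dashboard_refresh_rate"]),
    ("AI & Automation", ["enable_ai_features", "default_ai_provider",
                         "enable_auto_reactions", "default_emoji_mode"]),
    ("Advanced", ["show_unmonitored_groups", "activity_chart_style"]) ]

-- A's for-loop over categories.items(): return the first category whose keys list contains key
def pvALoop (key : String) : List (String × List String) → String
  | [] => "Other"
  | (category, keys) :: rest => if keys.contains key then category else pvALoop key rest

def categorize_preference_py (key : String) : String :=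
  pvALoop key pvCategories

-- ===== PORT B =====
-- B's _PAIRS: the 19 (key, category) pairs sorted by key
def pvPairs : List (String × String) :=
  [ ("activity_chart_style", "Advanced"),
    ("auto_refresh_interval", "Notifications"),
    ("compact_message_view", "Messages"),
    ("dashboard_refresh_rate", "Notifications"),
    ("date_format", "Display"),
    ("default_ai_provider", "AI & Automation"),
    ("default_emoji_mode", "AI & Automation"),
    ("enable_ai_features", "AI & Automation"),
    ("enable_auto_reactions", "AI & Automation"),
    ("filter_persist_navigation", "Messages"),
    ("language", "Display"),
    ("messages_per_page", "Messages"),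
    ("notification_sound", "Notifications"),
    ("show_deleted_messages", "Messages"),
    ("show_message_previews", "Messages"),
    ("show_reaction_notifications", "Notifications"),
    ("show_unmonitored_groups", "Advanced"),
    ("time_format", "Display"),
    ("timezone", "Display") ]

-- B's 'while lo < hi' bisection loop as fuel recursion (fuel 32 bounds the loop's ≤ ⌈log2 19⌉+1
-- iterations). Python's str '<' is lexicographic on code points = '<' on the Lists of Chars (exact
-- on any strings, in particular the ASCII domain).
def pvBSearch (key : String) : Nat → Nat → Nat → String
  | 0, _, _ => "Other"
  | fuel + 1, lo, hi =>
    if lo < hi then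
      match pvPairs[(lo + hi) / 2]? with
      | some (k, category) =>
        if key.toList < k.toList then pvBSearch key fuel lo ((lo + hi) / 2)
        else if k.toList < key.toList then pvBSearch key fuel ((lo + hi) / 2 + 1) hi
        else category
      | none => "Other"
    else "Other"

def categorize_preference_py_alt (key : String) : String :=
  pvBSearch key 32 0 pvPairs.length

-- ===== PRECONDITION & SPEC =====
def Spec_categorize_preference_py (key : String) (out : String) : Prop := out = categorize_preference_py_alt key
instance (key : String) (out : String) : Decidable (Spec_categorize_preference_py key out) := by unfold Spec_categorize_preference_py; infer_instance

-- ===== CLAIM (what is proved, stated in full; the proofs are below) =====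
def Claim_equal_categorize_preference_py : Prop := ∀ (key : String), Dom_categorize_preference_py key → Spec_categorize_preference_py key (categorize_preference_py key)

-- ===== LEMMAS AND PROOFS =====

-- if key matches no key of the table, bisection returns "Other" (the eq-branch would exhibit a member)
theorem pvBSearch_not_mem (key : String) (h : ∀ p ∈ pvPairs, p.1 ≠ key) :
    ∀ (fuel lo hi : Nat), pvBSearch key fuel lo hi = "Other" := by
  intro fuel
  induction fuel with
  | zero => intro lo hi; rfl
  | succ f ih =>
    intro lo hi
    rw [pvBSearch]
    split
    · rcases hm : pvPairs[(lo + hi) / 2]? with _ | ⟨k, c⟩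
      · simp
      · have hne : k ≠ key := h (k, c) (List.mem_of_getElem? hm)
        by_cases h1 : key.toList < k.toList
        · simp [h1, ih]
        · by_cases h2 : k.toList < key.toList
          · simp [h1, h2, ih]
          · exact absurd (String.ext (le_antisymm (not_lt.mp h1) (not_lt.mp h2))) hne
    · rfl

-- if key matches no key of the table, A's scan returns "Other"
theorem pvALoop_not_mem (key : String) (h : ∀ p ∈ pvPairs, p.1 ≠ key) :
    categorize_preference_py key = "Other" := by
  have f : ∀ s : String, s ∈ pvPairs.map Prod.fst → (key == s) = false := by
    intro s hs
    rcases List.exists_of_mem_map hs with ⟨p, hp, rfl⟩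
    exact beq_eq_false_iff_ne.mpr fun e => h p hp e.symm
  simp only [categorize_preference_py, pvCategories, pvALoop, List.contains_cons,
    List.contains_nil, Bool.or_false,
        f "activity_chart_style" (by decide),
        f "auto_refresh_interval" (by decide),
        f "compact_message_view" (by decide),
        f "dashboard_refresh_rate" (by decide),
        f "date_format" (by decide),
        f "default_ai_provider" (by decide),
        f "default_emoji_mode" (by decide),
        f "enable_ai_features" (by decide),
        f "enable_auto_reactions" (by decide),
        f "filter_persist_navigation" (by decide),
        f "language" (by decide),
        f "messages_per_page" (by decide),
        f "notification_sound" (by decide),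
        f "show_deleted_messages" (by decide),
        f "show_message_previews" (by decide),
        f "show_reaction_notifications" (by decide),
        f "show_unmonitored_groups" (by decide),
        f "time_format" (by decide),
        f "timezone" (by decide)]
  simp

-- ===== VERDICT (by name: the statement is the Claim_ definition above) =====
theorem categorize_preference_py_spec : Claim_equal_categorize_preference_py := by
  intro key _
  unfold Spec_categorize_preference_py
  by_cases hk : key ∈ pvPairs.map Prod.fst
  · simp only [pvPairs, List.map_cons, List.map_nil, List.mem_cons, List.not_mem_nil, or_false] at hk
    rcases hk with rfl | rfl | rfl | rfl | rfl | rfl | rfl | rfl | rfl | rfl | rfl | rfl | rfl | rfl | rfl | rfl | rfl | rfl | rfl <;> decide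
  · have h : ∀ p ∈ pvPairs, p.1 ≠ key := fun p hp he => hk (he ▸ List.mem_map_of_mem hp)
    rw [pvALoop_not_mem key h, categorize_preference_py_alt, pvBSearch_not_mem key h]
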